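-- pv_equiv track=rewrite | github.com/dhruvagarwal29/Leetcode-Prep-Jan_2023 | subsets/unique_generalized_abbreviations.py | abbre
-- ===== SOURCE A (Python) =====
-- from collections import deque
--
-- def abbre(str):
--     result = deque()
--     result.append("")
--     for i in range(len(str)):
--         char = str[i]
--         current_size = len(result)
--         for i in range(current_size):
--             new_str = result.popleft()
--             # adding the _
--             result.append(new_str + "_")
--             # ading the char
--             result.append(new_str + char)
--
--     return change_char(list(result))
--
-- def change_char(arr):
--     result = []
--     for word in arr:
--         count = 0
--         new_word = ""
--         for i in range(len(word)):
--             if word[i] =="_":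
--                 count += 1
--             else:
--                 if count > 0:
--                     new_word += str(count) + word[i]
--                     count = 0
--                 else:
--                     new_word += word[i]
--                     count = 0
--
--         if count > 0:
--             new_word = new_word + str(count)
--         result.append(new_word)
--
--     return result
-- ===== SOURCE B (Python) =====
-- def abbre(str):
--     result = []
--
--     def dfs(i, count, cur):
--         if i == len(str):
--             result.append(cur + (f"{count}" if count > 0 else ""))
--             return
--         # abbreviate str[i]
--         dfs(i + 1, count + 1, cur)
--         # keep str[i]
--         dfs(i + 1, 0, cur + (f"{count}" if count > 0 else "") + str[i])
--
--     dfs(0, 0, "")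
--     return result
-- ===== Notes on version B (the rewrite author's own statement) =====
-- stated objective: alternative
-- what changed: Replaces A's BFS deque level-expansion over raw '_'-marker strings followed by a change_char post-processing pass with a single recursive DFS that carries (index, count, current) and emits finished abbreviations directly.
-- outside the precondition, e.g. on abbre('_'): A returns ['1', '1'], B returns ['1', '_']
import Mathlib
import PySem

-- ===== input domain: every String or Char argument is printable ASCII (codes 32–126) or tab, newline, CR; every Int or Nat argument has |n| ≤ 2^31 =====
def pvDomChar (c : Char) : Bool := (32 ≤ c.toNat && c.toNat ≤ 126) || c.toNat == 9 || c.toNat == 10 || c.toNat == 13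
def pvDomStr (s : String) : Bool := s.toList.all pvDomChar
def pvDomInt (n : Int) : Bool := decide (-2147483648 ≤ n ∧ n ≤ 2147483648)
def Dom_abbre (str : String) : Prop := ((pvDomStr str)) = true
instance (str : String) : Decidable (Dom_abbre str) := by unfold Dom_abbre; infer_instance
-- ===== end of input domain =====

-- B replaces A's BFS deque expansion + post-processing pass by a direct recursive
-- DFS over the string that carries (count, current) and emits finished abbreviations.

-- ===== PORT A =====
-- B replaces A's BFS deque expansion + change_char post-processing pass by one
-- recursive DFS carrying (count, current) that emits finished abbreviations directly.

/-- str(count) as a list of chars. -/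
def toStrL (n : Int) : List Char := (PySem.Int.toStr n).toList

/-- A's inner `for i in range(current_size)` loop: popleft, append new+"_" and new+char. -/
def abbreInner : Nat → List (List Char) → Char → List (List Char)
  | 0, res, _ => res
  | _ + 1, [], _ => []          -- unreachable: the deque always holds ≥ current_size items
  | k + 1, x :: rest, c => abbreInner k (rest ++ [x ++ ['_'], x ++ [c]]) c

/-- One step of change_char's inner loop; state = (count, new_word). -/
def changeStep (st : Int × List Char) (ch : Char) : Int × List Char :=
  if ch = '_' then (st.1 + 1, st.2)
  else if st.1 > 0 then (0, st.2 ++ toStrL st.1 ++ [ch]) else (0, st.2 ++ [ch])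

/-- change_char's trailing `if count > 0` fix-up. -/
def changeFinish (st : Int × List Char) : List Char :=
  if st.1 > 0 then st.2 ++ toStrL st.1 else st.2

def changeWordL (w : List Char) : List Char := changeFinish (List.foldl changeStep (0, []) w)

/-- change_char: build the result list word by word. -/
def changeChar (arr : List (List Char)) : List (List Char) :=
  List.foldl (fun acc w => acc ++ [changeWordL w]) [] arr

def abbre (str : String) : List String :=
  let chars := str.toList
  let raw := List.foldl
      (fun (res : List (List Char)) (i : Int) =>
        abbreInner res.length res (PySem.List.pyGetD chars i 'a'))  -- i ∈ range(len) ⇒ in range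
      [([] : List Char)] (PySem.List.pyRange 0 (chars.length : Int) 1)
  (changeChar raw).map String.ofList

-- ===== PORT B =====

/-- B's dfs(i, count, cur), recursing on the remaining characters. -/
def dfsB : List Char → Int → List Char → List (List Char)
  | [], count, cur => [cur ++ (if count > 0 then toStrL count else [])]
  | c :: cs, count, cur =>
      dfsB cs (count + 1) cur ++
      dfsB cs 0 (cur ++ (if count > 0 then toStrL count else []) ++ [c])

def abbre_alt (str : String) : List String := (dfsB str.toList 0 []).map String.ofList

-- ===== PRECONDITION & SPEC =====
-- Pre_ excludes strings containing '_': A uses '_' internally as its abbreviation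
-- marker, so on such inputs (outside the function's natural word domain) change_char
-- collapses literal underscores into digit counts — an artefact of the sentinel that
-- B, which treats '_' as an ordinary character, does not reproduce.
def Pre_abbre (str : String) : Prop := '_' ∉ str.toList
instance (str : String) : Decidable (Pre_abbre str) := by unfold Pre_abbre; infer_instance

def pvWitness_abbre : String := "word"

def Spec_abbre (str : String) (out : List String) : Prop := out = abbre_alt str
instance (str : String) (out : List String) : Decidable (Spec_abbre str out) := by unfold Spec_abbre; infer_instance

-- ===== CLAIM (what is proved, stated in full; the proofs are below) =====
def Claim_equal_abbre : Prop := ∀ (str : String), Dom_abbre str → Pre_abbre str → Spec_abbre str (abbre str)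

-- ===== LEMMAS AND PROOFS =====

/-- The raw strings A's BFS produces, as a top-down recursion with accumulated prefix. -/
def gRaw : List Char → List Char → List (List Char)
  | x, [] => [x]
  | x, c :: cs => gRaw (x ++ ['_']) cs ++ gRaw (x ++ [c]) cs

theorem abbreInner_eq (c : Char) :
    ∀ (k : Nat) (res : List (List Char)), k ≤ res.length →
      abbreInner k res c =
        res.drop k ++ (res.take k).flatMap (fun x => [x ++ ['_'], x ++ [c]]) := by
  intro k
  induction k with
  | zero => intro res _; simp [abbreInner]
  | succ k ih =>
    intro res hk
    match res with
    | [] => simp at hk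
    | x :: rest =>
      simp at hk
      rw [abbreInner, ih _ (by simp; omega)]
      rw [List.drop_append_of_le_length (by omega), List.take_append_of_le_length (by omega)]
      simp

theorem foldl_flat (cs : List Char) :
    ∀ res : List (List Char),
      List.foldl (fun res c => abbreInner res.length res c) res cs =
        res.flatMap (fun x => gRaw x cs) := by
  induction cs with
  | nil => intro res; simp [gRaw]
  | cons c cs ih =>
    intro res
    rw [List.foldl_cons, abbreInner_eq c res.length res (le_refl _), ih]
    simp only [List.drop_length, List.take_length, List.nil_append, gRaw]
    rw [List.flatMap_assoc]
    simp

theorem gRaw_shift (cs : List Char) : ∀ x, gRaw x cs = (gRaw [] cs).map (x ++ ·) := by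
  induction cs with
  | nil => intro x; simp [gRaw]
  | cons c cs ih =>
    intro x
    rw [gRaw, gRaw, ih (x ++ ['_']), ih (x ++ [c])]
    simp only [List.nil_append]
    rw [ih ['_'], ih [c]]
    simp [List.map_map, Function.comp_def]

theorem dfsB_eq (cs : List Char) (h : '_' ∉ cs) :
    ∀ (count : Int) (cur : List Char),
      dfsB cs count cur =
        (gRaw [] cs).map (fun s => changeFinish (List.foldl changeStep (count, cur) s)) := by
  induction cs with
  | nil =>
    intro count cur
    simp only [dfsB, gRaw, changeFinish, List.map_cons, List.map_nil]
    by_cases hc : (0:Int) < count <;> simp [hc]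
  | cons c cs ih =>
    simp only [List.mem_cons, not_or] at h
    intro count cur
    rw [dfsB, ih h.2, ih h.2, gRaw]
    simp only [List.nil_append]
    rw [gRaw_shift cs ['_'], gRaw_shift cs [c]]
    rw [List.map_append, List.map_map, List.map_map]
    have hne : c ≠ '_' := fun e => h.1 e.symm
    congr 1
    all_goals
      apply List.map_congr_left
      intro s _
      by_cases hc : (0:Int) < count <;>
        simp [changeStep, hne, hc, List.append_assoc, Function.comp]

theorem abbre_raw (str : String) :
    abbre str = ((gRaw [] str.toList).map changeWordL).map String.ofList := by
  show (changeChar _).map String.ofList = _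
  rw [PySem.List.foldl_pyRange_zero_pyGetD' str.toList 'a'
        (fun res c => abbreInner res.length res c) [([] : List Char)]]
  rw [foldl_flat]
  simp only [List.flatMap_cons, List.flatMap_nil, List.append_nil]
  unfold changeChar
  rw [PySem.List.foldl_append_singleton_eq_map]
  simp

theorem abbre_eq_of_no_underscore (str : String) (h : '_' ∉ str.toList) :
    abbre str = abbre_alt str := by
  rw [abbre_raw, abbre_alt, dfsB_eq str.toList h 0 []]
  simp [changeWordL]

-- ===== VERDICT (by name: the statement is the Claim_ definition above) =====
theorem abbre_spec : Claim_equal_abbre := by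
  intro str _ hP
  exact abbre_eq_of_no_underscore str hP
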